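-- pv_equiv track=rewrite | github.com/m13253/chatlist | misc.py | replace_prefix
-- ===== SOURCE A (Python) =====
-- def replace_prefix(s, prefix):
--     res=''
--     lastisslash=False
--     for i in s:
--         if lastisslash:
--             if i=='-':
--                 res+=prefix
--             else:
--                 res+=i
--             lastisslash=False
--         elif i=='/':
--             lastisslash=True
--         else:
--             res+=i
--     if lastisslash:
--         res+='/'
--     return res
-- ===== SOURCE B (Python) =====
-- def replace_prefix(s, prefix):
--     it = iter(s)
--     out = []
--     for c in it:
--         if c == '/':
--             d = next(it, None)
--             if d is None:
--                 out.append('/')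
--             else:
--                 out.append(prefix if d == '-' else d)
--         else:
--             out.append(c)
--     return ''.join(out)
-- ===== Notes on version B (the rewrite author's own statement) =====
-- stated objective: alternative
-- what changed: Replaces the boolean 'lastisslash' state machine with a pairing scan: iterate once and, on '/', pull the next character directly from the iterator, so there is no carried flag and no post-loop fixup of leftover state; output is collected in a list and joined once.
import Mathlib
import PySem

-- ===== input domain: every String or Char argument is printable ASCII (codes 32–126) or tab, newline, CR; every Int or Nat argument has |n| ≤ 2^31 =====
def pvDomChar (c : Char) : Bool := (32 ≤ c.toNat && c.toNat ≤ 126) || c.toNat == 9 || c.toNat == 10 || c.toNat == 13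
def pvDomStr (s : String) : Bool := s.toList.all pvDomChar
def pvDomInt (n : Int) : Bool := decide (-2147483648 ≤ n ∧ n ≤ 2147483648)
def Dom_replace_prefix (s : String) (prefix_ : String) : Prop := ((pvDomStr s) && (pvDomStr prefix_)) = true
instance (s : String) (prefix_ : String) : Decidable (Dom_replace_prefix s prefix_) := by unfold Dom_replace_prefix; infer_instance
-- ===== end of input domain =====

-- B replaces A's boolean 'lastisslash' state machine by a pairing scan that consumes
-- the character after each '/' directly (objective: alternative decomposition; same cost).

-- ===== PORT A =====
-- literal port of A: fold over the characters with state (res, lastisslash), then the final fixup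
def replace_prefix (s : String) (prefix_ : String) : String :=
  let st := s.toList.foldl
    (fun (acc : String × Bool) i =>
      if acc.2 then
        (if i = '-' then acc.1 ++ prefix_ else acc.1.push i, false)
      else if i = '/' then
        (acc.1, true)
      else
        (acc.1.push i, false))
    ("", false)
  if st.2 then st.1.push '/' else st.1

-- ===== PORT B =====
-- port of Source B's loop: on '/', take the next character from the stream; a lone trailing '/' stays
def rpAux (prefix_ : List Char) : List Char → List Char
  | [] => []
  | ['/'] => ['/']
  | '/' :: d :: rest => (if d = '-' then prefix_ else [d]) ++ rpAux prefix_ rest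
  | c :: rest => c :: rpAux prefix_ rest

def replace_prefix_alt (s : String) (prefix_ : String) : String :=
  String.ofList (rpAux prefix_.toList s.toList)

-- ===== PRECONDITION & SPEC =====
def Spec_replace_prefix (s : String) (prefix_ : String) (out : String) : Prop := out = replace_prefix_alt s prefix_
instance (s : String) (prefix_ : String) (out : String) : Decidable (Spec_replace_prefix s prefix_ out) := by unfold Spec_replace_prefix; infer_instance

-- ===== CLAIM (what is proved, stated in full; the proofs are below) =====
def Claim_equal_replace_prefix : Prop := ∀ (s : String) (prefix_ : String), Dom_replace_prefix s prefix_ → Spec_replace_prefix s prefix_ (replace_prefix s prefix_)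

-- ===== LEMMAS AND PROOFS =====

-- A's loop body
def rpStep (prefix_ : String) (acc : String × Bool) (i : Char) : String × Bool :=
  if acc.2 then
    (if i = '-' then acc.1 ++ prefix_ else acc.1.push i, false)
  else if i = '/' then
    (acc.1, true)
  else
    (acc.1.push i, false)

-- A's final fixup
def rpFin (st : String × Bool) : String := if st.2 then st.1.push '/' else st.1

theorem step_false_slash (p res : String) : rpStep p (res, false) '/' = (res, true) := by
  simp [rpStep]

theorem step_false_other (p res : String) (c : Char) (hc : c ≠ '/') :
    rpStep p (res, false) c = (res.push c, false) := by
  simp [rpStep, hc]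

theorem step_true_dash (p res : String) : rpStep p (res, true) '-' = (res ++ p, false) := by
  simp [rpStep]

theorem step_true_other (p res : String) (c : Char) (hd : c ≠ '-') :
    rpStep p (res, true) c = (res.push c, false) := by
  simp [rpStep, hd]

theorem mk_nil_append (res : String) : res ++ String.ofList [] = res := by
  simp

theorem mk_cons_append (res : String) (c : Char) (l : List Char) :
    res ++ String.ofList (c :: l) = res.push c ++ String.ofList l := by
  apply String.ext
  simp [String.toList_ofList]

theorem mk_listappend_append (res p : String) (l : List Char) :
    res ++ String.ofList (p.toList ++ l) = (res ++ p) ++ String.ofList l := by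
  apply String.ext
  simp [String.toList_ofList]

theorem rpAux_cons_other (p : List Char) (c : Char) (l : List Char) (hc : c ≠ '/') :
    rpAux p (c :: l) = c :: rpAux p l := by
  cases l with
  | nil => rw [rpAux.eq_def]; simp [hc]
  | cons d r => rw [rpAux.eq_def]; simp [hc]

theorem rpAux_slash_cons (p : List Char) (d : Char) (l : List Char) :
    rpAux p ('/' :: d :: l) = (if d = '-' then p else [d]) ++ rpAux p l := by
  rw [rpAux.eq_def]
  rfl

-- invariant: from either flag, the finished fold is the accumulator plus B's answer
-- (from flag = true, the pending '/' is prepended to the remaining input)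
theorem rp_invariant (prefix_ : String) (l : List Char) : ∀ (res : String),
    rpFin (l.foldl (rpStep prefix_) (res, false)) = res ++ String.ofList (rpAux prefix_.toList l)
    ∧ rpFin (l.foldl (rpStep prefix_) (res, true)) = res ++ String.ofList (rpAux prefix_.toList ('/' :: l)) := by
  induction l with
  | nil =>
    intro res
    refine ⟨?_, ?_⟩
    · simp [rpFin, rpAux]
    · show res.push '/' = res ++ String.ofList (rpAux prefix_.toList ['/'])
      rw [show rpAux prefix_.toList ['/'] = ['/'] from by rw [rpAux.eq_def]; rfl,
        mk_cons_append, mk_nil_append]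
  | cons c rest ih =>
    intro res
    refine ⟨?_, ?_⟩
    · by_cases hc : c = '/'
      · subst hc
        rw [List.foldl_cons, step_false_slash]
        exact (ih res).2
      · rw [List.foldl_cons, step_false_other _ _ _ hc, rpAux_cons_other _ _ _ hc,
          mk_cons_append]
        exact (ih (res.push c)).1
    · rw [List.foldl_cons, rpAux_slash_cons]
      by_cases hd : c = '-'
      · subst hd
        rw [step_true_dash, if_pos rfl, mk_listappend_append]
        exact (ih (res ++ prefix_)).1
      · rw [step_true_other _ _ _ hd, if_neg hd, List.singleton_append, mk_cons_append]
        exact (ih (res.push c)).1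

-- ===== VERDICT (by name: the statement is the Claim_ definition above) =====
theorem replace_prefix_spec : Claim_equal_replace_prefix := by
  intro s prefix_ _
  show replace_prefix s prefix_ = replace_prefix_alt s prefix_
  have h := (rp_invariant prefix_ s.toList "").1
  have e : "" ++ String.ofList (rpAux prefix_.toList s.toList) = String.ofList (rpAux prefix_.toList s.toList) := by
    apply String.ext
    simp
  rw [e] at h
  simpa [replace_prefix, replace_prefix_alt, rpStep, rpFin] using h
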